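-- pv_equiv track=rewrite | github.com/AdamJonsson/DD1315 | Labbar/lab2/my_module.py | bandit_language
-- ===== SOURCE A (Python) =====
-- def bandit_language(wordToTranslate):
--     consonants = ["B", "C", "D", "F", "G", "H", "J", "K", "L", "M", "N", "P", "Q", "R", "S", "T", "V", "X", "Z", "W", "Y"]
--     newWord = ""
--     for char in wordToTranslate:
--         newWord += char
--         if(char.upper() in consonants):
--             newWord += "o"
--     return newWord
-- ===== SOURCE B (Python) =====
-- import re
--
-- def bandit_language(wordToTranslate):
--     return re.sub(r'([bcdfghjklmnpqrstvwxyzBCDFGHJKLMNPQRSTVWXYZ])', r'\1o', wordToTranslate)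
-- ===== Notes on version B (the rewrite author's own statement) =====
-- stated objective: idiomatic
-- what changed: Replaced the explicit accumulator loop with its per-character upper-case membership test by a single regex substitution over a both-case consonant character class whose replacement appends the vowel after each match.
import Mathlib
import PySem

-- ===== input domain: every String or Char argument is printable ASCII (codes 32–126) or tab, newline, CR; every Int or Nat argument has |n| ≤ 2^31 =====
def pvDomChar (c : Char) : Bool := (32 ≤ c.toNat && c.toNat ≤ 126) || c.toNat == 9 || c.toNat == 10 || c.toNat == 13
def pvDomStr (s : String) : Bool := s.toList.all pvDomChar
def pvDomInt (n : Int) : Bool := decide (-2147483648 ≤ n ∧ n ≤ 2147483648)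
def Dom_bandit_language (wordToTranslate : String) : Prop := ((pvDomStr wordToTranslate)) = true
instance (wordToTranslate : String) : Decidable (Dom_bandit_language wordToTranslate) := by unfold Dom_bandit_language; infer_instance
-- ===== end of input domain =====

-- B replaces A's explicit accumulator loop by a single regex substitution appending 'o' to each consonant (idiomatic).

-- ===== PORT A =====
-- A's uppercase consonant list, in A's order
def banditConsonantsA : List Char :=
  ['B', 'C', 'D', 'F', 'G', 'H', 'J', 'K', 'L', 'M', 'N', 'P', 'Q', 'R', 'S', 'T', 'V', 'X', 'Z', 'W', 'Y']

def bandit_language (wordToTranslate : String) : String :=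
  wordToTranslate.toList.foldl
    (fun newWord char =>
      let newWord := newWord ++ String.singleton char
      if PySem.Chars.upperChar char ∈ banditConsonantsA then newWord ++ "o" else newWord)
    ""

-- ===== PORT B =====
-- the regex character class [bcdfghjklmnpqrstvwxyzBCDFGHJKLMNPQRSTVWXYZ]
def banditClassB : List Char :=
  ['b','c','d','f','g','h','j','k','l','m','n','p','q','r','s','t','v','w','x','y','z',
   'B','C','D','F','G','H','J','K','L','M','N','P','Q','R','S','T','V','W','X','Y','Z']

-- re.sub on a single-character class with replacement '\1o': each matching char becomes itself followed by 'o'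
def bandit_language_alt (wordToTranslate : String) : String :=
  String.ofList (wordToTranslate.toList.flatMap (fun c => if c ∈ banditClassB then [c, 'o'] else [c]))

-- ===== PRECONDITION & SPEC =====
def Spec_bandit_language (wordToTranslate : String) (out : String) : Prop := out = bandit_language_alt wordToTranslate
instance (wordToTranslate : String) (out : String) : Decidable (Spec_bandit_language wordToTranslate out) := by unfold Spec_bandit_language; infer_instance

-- ===== CLAIM (what is proved, stated in full; the proofs are below) =====
def Claim_equal_bandit_language : Prop := ∀ (wordToTranslate : String), Dom_bandit_language wordToTranslate → Spec_bandit_language wordToTranslate (bandit_language wordToTranslate)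

-- ===== LEMMAS AND PROOFS =====

-- the two membership tests agree on every domain character
theorem bandit_mem_agree (c : Char) (h : pvDomChar c = true) :
    (PySem.Chars.upperChar c ∈ banditConsonantsA) ↔ (c ∈ banditClassB) := by
  have hle : c.toNat ≤ 126 := by
    simp only [pvDomChar, Bool.or_eq_true, Bool.and_eq_true, decide_eq_true_eq, beq_iff_eq] at h
    omega
  have hall : ∀ n : Fin 127,
      ((PySem.Chars.upperChar (Char.ofNat n.val) ∈ banditConsonantsA) ↔ (Char.ofNat n.val ∈ banditClassB)) := by
    decide
  have := hall ⟨c.toNat, by omega⟩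
  simpa [Char.ofNat_toNat] using this

theorem bandit_fold_eq (l : List Char) (acc : String) (h : ∀ c ∈ l, pvDomChar c = true) :
    l.foldl
      (fun newWord char =>
        let newWord := newWord ++ String.singleton char
        if PySem.Chars.upperChar char ∈ banditConsonantsA then newWord ++ "o" else newWord)
      acc
    = acc ++ String.ofList (l.flatMap (fun c => if c ∈ banditClassB then [c, 'o'] else [c])) := by
  induction l generalizing acc with
  | nil => simp
  | cons c l ih =>
    have hc : pvDomChar c = true := h c (List.mem_cons_self ..)
    have ih' := ih (h := fun x hx => h x (List.mem_cons_of_mem _ hx))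
    by_cases hm : c ∈ banditClassB
    · have : PySem.Chars.upperChar c ∈ banditConsonantsA := (bandit_mem_agree c hc).mpr hm
      simp only [List.foldl_cons, List.flatMap_cons, if_pos this, if_pos hm, ih']
      apply String.toList_inj.mp
      simp [String.singleton]
    · have : PySem.Chars.upperChar c ∉ banditConsonantsA := fun hh => hm ((bandit_mem_agree c hc).mp hh)
      simp only [List.foldl_cons, List.flatMap_cons, if_neg this, if_neg hm, ih']
      apply String.toList_inj.mp
      simp [String.singleton]

-- ===== VERDICT (by name: the statement is the Claim_ definition above) =====
theorem bandit_language_spec : Claim_equal_bandit_language := by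
  intro w hdom
  unfold Spec_bandit_language bandit_language bandit_language_alt
  have h : ∀ c ∈ w.toList, pvDomChar c = true := by
    simpa [Dom_bandit_language, pvDomStr, List.all_eq_true] using hdom
  simpa using bandit_fold_eq w.toList "" h
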